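-- pv_equiv track=rewrite | github.com/dilroseR/Coding-questions | Problem 12.py | solve
-- ===== SOURCE A (Python) =====
-- def solve(nums0, nums1, k):
--     lst=[]
--     tot=0
--     for i in nums0:
--         for j in nums1:
--             sum=0
--             sum=i+j
--             lst.append(sum)
--     lst=sorted(lst,reverse=True)
--     for i in range(0,k):
--         tot=tot+lst[i]
--     return tot
-- ===== SOURCE B (Python) =====
-- def solve(nums0, nums1, k):
--     # Streaming selection: keep only the k largest pair sums seen so far in a
--     # small ascending buffer; never materialize or sort the full n*m list.
--     if k <= 0:
--         return 0
--     top = []  # ascending list of the (at most k) largest pair sums seen so far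
--     for i in nums0:
--         for j in nums1:
--             s = i + j
--             if len(top) == k and s <= top[0]:
--                 continue
--             idx = 0
--             while idx < len(top) and top[idx] < s:
--                 idx += 1
--             top.insert(idx, s)
--             if len(top) > k:
--                 top.pop(0)
--     return sum(top)
-- ===== Notes on version B (the rewrite author's own statement) =====
-- stated objective: alternative
-- what changed: B never materializes or sorts the n*m pair-sum list: it streams over the pair sums once, maintaining only a bounded ascending buffer of the k largest seen so far (skip if below the current minimum, ordered insert, drop the minimum when over k), and returns the buffer's sum.
import Mathlib
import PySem

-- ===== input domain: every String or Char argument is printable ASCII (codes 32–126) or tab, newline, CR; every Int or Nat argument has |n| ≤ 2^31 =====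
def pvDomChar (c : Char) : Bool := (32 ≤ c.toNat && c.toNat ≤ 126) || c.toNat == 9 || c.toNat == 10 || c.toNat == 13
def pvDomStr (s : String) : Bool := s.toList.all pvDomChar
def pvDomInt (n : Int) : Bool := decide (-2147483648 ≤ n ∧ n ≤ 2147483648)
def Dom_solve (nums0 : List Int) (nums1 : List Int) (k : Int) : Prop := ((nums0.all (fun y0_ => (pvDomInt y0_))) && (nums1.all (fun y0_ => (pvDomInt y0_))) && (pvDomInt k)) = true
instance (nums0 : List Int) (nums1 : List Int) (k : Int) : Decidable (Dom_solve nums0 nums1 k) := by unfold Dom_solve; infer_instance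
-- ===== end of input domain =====

-- B streams over the pair sums once keeping only a bounded ascending buffer of the k
-- largest seen so far, instead of materializing and sorting all n*m sums (objective: alternative).

-- ===== PORT A =====
def solve (nums0 : List Int) (nums1 : List Int) (k : Int) : Int :=
  let lst : List Int :=
    nums0.foldl (fun acc i => nums1.foldl (fun acc2 j => acc2 ++ [i + j]) acc) []
  let lst := PySem.List.sorted lst id true
  -- lst[i] raises IndexError when i ≥ len lst; those inputs are outside Pre_solve (default 0 unused there)
  (PySem.List.pyRange 0 k 1).foldl (fun tot i => tot + PySem.List.pyGetD lst i 0) 0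

-- ===== PORT B =====
-- Source B's "scan for the first index with top[idx] ≥ s, then top.insert(idx, s)", fused into
-- one left-to-right recursion over the ascending buffer (exact on every list).
def insertAsc (s : Int) : List Int → List Int
  | [] => [s]
  | x :: xs => if s ≤ x then s :: x :: xs else x :: insertAsc s xs

-- one inner-loop body of Source B: skip if the buffer is full and s is no larger than its
-- minimum, else ordered-insert and drop the minimum (top.pop(0)) when over k
def stepTop (k : Nat) (top : List Int) (s : Int) : List Int :=
  if top.length = k ∧ s ≤ top.headD 0 then top
  else if k < (insertAsc s top).length then (insertAsc s top).tail
  else insertAsc s top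

def solve_alt (nums0 : List Int) (nums1 : List Int) (k : Int) : Int :=
  if k ≤ 0 then 0
  else
    (nums0.foldl (fun top i => nums1.foldl (fun tp j => stepTop k.toNat tp (i + j)) top) []).sum

-- ===== PRECONDITION & SPEC =====
-- Pre_ excludes exactly the inputs with k > len(nums0)*len(nums1), on which A raises IndexError.
def Pre_solve (nums0 : List Int) (nums1 : List Int) (k : Int) : Prop :=
  k ≤ (nums0.length : Int) * (nums1.length : Int)
instance (nums0 : List Int) (nums1 : List Int) (k : Int) : Decidable (Pre_solve nums0 nums1 k) := by unfold Pre_solve; infer_instance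
def pvWitness_solve : List Int × List Int × Int := ([1, 2], [3], 2)

def Spec_solve (nums0 : List Int) (nums1 : List Int) (k : Int) (out : Int) : Prop := out = solve_alt nums0 nums1 k
instance (nums0 : List Int) (nums1 : List Int) (k : Int) (out : Int) : Decidable (Spec_solve nums0 nums1 k out) := by unfold Spec_solve; infer_instance

-- ===== CLAIM (what is proved, stated in full; the proofs are below) =====
def Claim_equal_solve : Prop := ∀ (nums0 : List Int) (nums1 : List Int) (k : Int), Dom_solve nums0 nums1 k → Pre_solve nums0 nums1 k → Spec_solve nums0 nums1 k (solve nums0 nums1 k)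

-- ===== LEMMAS AND PROOFS =====

-- A's nested append loops build exactly the flatMap of pair sums.
lemma pairs_eq (nums0 nums1 : List Int) :
    nums0.foldl (fun acc i => nums1.foldl (fun acc2 j => acc2 ++ [i + j]) acc) []
      = nums0.flatMap (fun i => nums1.map (fun j => i + j)) := by
  have h : ∀ (xs : List Int) (acc : List Int),
      xs.foldl (fun acc i => nums1.foldl (fun acc2 j => acc2 ++ [i + j]) acc) acc
        = acc ++ xs.flatMap (fun i => nums1.map (fun j => i + j)) := by
    intro xs
    induction xs with
    | nil => simp
    | cons x xs ih =>
      intro acc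
      rw [List.foldl_cons, PySem.List.foldl_append_singleton_eq_map, ih, List.flatMap_cons]
      simp
  simpa using h nums0 []

-- B's nested loops process exactly the flatMap of pair sums, in order.
lemma fold_pairs_eq (nums0 nums1 : List Int) (k : Nat) (acc : List Int) :
    nums0.foldl (fun top i => nums1.foldl (fun tp j => stepTop k tp (i + j)) top) acc
      = (nums0.flatMap (fun i => nums1.map (fun j => i + j))).foldl (stepTop k) acc := by
  induction nums0 generalizing acc with
  | nil => simp
  | cons x xs ih =>
    rw [List.foldl_cons, ih, List.flatMap_cons, List.foldl_append, List.foldl_map]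

-- insertAsc is Mathlib's orderedInsert.
lemma insertAsc_eq (s : Int) (l : List Int) :
    insertAsc s l = l.orderedInsert (· ≤ ·) s := by
  induction l with
  | nil => rfl
  | cons x xs ih => simp [insertAsc, List.orderedInsert, ih]

lemma length_insertAsc (s : Int) (l : List Int) :
    (insertAsc s l).length = l.length + 1 := by
  rw [insertAsc_eq]; exact List.orderedInsert_length ..

lemma perm_insertAsc (s : Int) (l : List Int) : (insertAsc s l).Perm (s :: l) := by
  rw [insertAsc_eq]; exact List.perm_orderedInsert ..

lemma sorted_insertAsc (s : Int) (l : List Int) (h : l.Pairwise (· ≤ ·)) :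
    (insertAsc s l).Pairwise (· ≤ ·) := by
  rw [insertAsc_eq]; exact List.Pairwise.orderedInsert s l h

-- Source B's running ascending buffer built by ordered inserts: the insertion sort of the seen list.
def sortA (S : List Int) : List Int := S.foldl (fun acc x => insertAsc x acc) []

lemma sortA_append (S : List Int) (s : Int) :
    sortA (S ++ [s]) = insertAsc s (sortA S) := by
  simp [sortA]

lemma sortA_sorted_perm (S : List Int) :
    (sortA S).Pairwise (· ≤ ·) ∧ (sortA S).Perm S := by
  induction S using List.reverseRecOn with
  | nil => exact ⟨List.Pairwise.nil, by simp [sortA]⟩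
  | append_singleton S s ih =>
    rw [sortA_append]
    exact ⟨sorted_insertAsc _ _ ih.1,
      ((perm_insertAsc s (sortA S)).trans (ih.2.cons s)).trans
        (List.perm_append_singleton s S).symm⟩

-- dropping past an insertion that lands within the first d elements
lemma drop_succ_insertAsc (s : Int) (l : List Int) (d : Nat) (hd : d < l.length)
    (hs : s ≤ l[d]) : (insertAsc s l).drop (d + 1) = l.drop d := by
  induction l generalizing d with
  | nil => simp at hd
  | cons x xs ih =>
    cases d with
    | zero =>
      simp only [List.getElem_cons_zero] at hs
      simp [insertAsc, hs]
    | succ d =>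
      simp only [List.getElem_cons_succ] at hs
      by_cases hx : s ≤ x
      · simp [insertAsc, hx, List.drop_succ_cons]
      · simp only [insertAsc, if_neg hx, List.drop_succ_cons]
        exact ih d (by simpa using hd) hs

-- an insertion past a prefix of strictly smaller elements commutes with dropping that prefix
lemma drop_insertAsc (s : Int) (l : List Int) (d : Nat) (hd : d ≤ l.length)
    (h : ∀ x ∈ l.take d, x < s) : (insertAsc s l).drop d = insertAsc s (l.drop d) := by
  induction l generalizing d with
  | nil => simp at hd; simp [hd]
  | cons x xs ih =>
    cases d with
    | zero => simp
    | succ d =>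
      have hx : x < s := h x (by simp)
      simp only [insertAsc, if_neg (not_le.mpr hx), List.drop_succ_cons]
      exact ih d (by simpa using hd) (fun y hy => h y (by simp [hy]))

-- one streaming step on the k-largest suffix equals inserting then re-taking the k-largest suffix
lemma step_lastK (k : Nat) (hk : 1 ≤ k) (l : List Int) (hl : l.Pairwise (· ≤ ·)) (s : Int) :
    stepTop k (l.drop (l.length - k)) s = (insertAsc s l).drop (l.length + 1 - k) := by
  by_cases hkn : k ≤ l.length
  · set d := l.length - k with hdd
    have hdlt : d < l.length := by omega
    have hdrop : l.drop d = l[d] :: l.drop (d + 1) := List.drop_eq_getElem_cons hdlt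
    have hlen : (l.drop d).length = k := by simp; omega
    have hd1 : l.length + 1 - k = d + 1 := by omega
    have hhead : (l.drop d).headD 0 = l[d] := by rw [hdrop]; rfl
    by_cases hs : s ≤ l[d]
    · -- skip branch: buffer unchanged; the inserted s is dropped again on the right
      rw [stepTop, if_pos ⟨hlen, by rw [hhead]; exact hs⟩, hd1,
        drop_succ_insertAsc s l d hdlt hs]
    · -- insert branch: s lands in the kept suffix, the old minimum is dropped
      have hstep : stepTop k (l.drop d) s = (insertAsc s (l.drop d)).tail := by
        rw [stepTop, if_neg (by rw [hhead]; exact fun h => hs h.2),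
          if_pos (by rw [length_insertAsc, hlen]; omega)]
      have hall : ∀ x ∈ l.take (d + 1), x < s := by
        intro x hx
        obtain ⟨i, hi, rfl⟩ := List.mem_take_iff_getElem.mp hx
        have hid : i ≤ d := by simp at hi; omega
        have hle : l[i] ≤ l[d] := by
          rcases Nat.lt_or_ge i d with h | h
          · exact List.pairwise_iff_getElem.mp hl i d (by omega) hdlt h
          · have : i = d := by omega
            subst this; exact le_refl _
        omega
      rw [hstep, hdrop]
      simp only [insertAsc, if_neg hs, List.tail_cons]
      rw [hd1, drop_insertAsc s l (d + 1) (by omega) hall]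
  · -- buffer not yet full: plain insert, nothing dropped on either side
    have h0 : l.length - k = 0 := by omega
    have h1 : l.length + 1 - k = 0 := by omega
    rw [h0, h1, List.drop_zero, List.drop_zero, stepTop,
      if_neg (by intro h; omega), if_neg (by rw [length_insertAsc]; omega)]

-- loop invariant: Source B's buffer after the seen prefix S is the k-largest suffix of sort(S)
lemma fold_stepTop (k : Nat) (hk : 1 ≤ k) (S : List Int) :
    S.foldl (stepTop k) [] = (sortA S).drop ((sortA S).length - k) := by
  induction S using List.reverseRecOn with
  | nil => simp [sortA]
  | append_singleton S s ih =>
    rw [List.foldl_append, List.foldl_cons, List.foldl_nil, ih, sortA_append,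
      step_lastK k hk (sortA S) (sortA_sorted_perm S).1 s, length_insertAsc]

-- Python's stable reverse sort of an Int list is the reverse of its ascending sort.
lemma sorted_rev_eq (l : List Int) :
    PySem.List.sorted l id true = (PySem.List.sorted l id false).reverse := by
  refine List.Perm.eq_of_pairwise (le := fun a b : Int => b ≤ a)
    (fun _ _ _ _ hab hba => le_antisymm hba hab) ?_ ?_ ?_
  · simpa using PySem.List.sorted_pairwise_rev l id
  · rw [List.pairwise_reverse]
    simpa using PySem.List.sorted_pairwise l id
  · exact ((PySem.List.sorted_perm l id true).trans
      ((PySem.List.sorted_perm l id false).symm)).trans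
      (List.reverse_perm _).symm

-- Summing lst[0..n-1] by index equals summing (take n lst).
lemma index_sum_nat (lst : List Int) (n : Nat) (hn : n ≤ lst.length) :
    (PySem.List.pyRange 0 (n : Int) 1).foldl (fun tot i => tot + PySem.List.pyGetD lst i 0) 0
      = (lst.take n).sum := by
  induction n with
  | zero => simp [PySem.List.pyRange_one_eq_nil]
  | succ m ih =>
    have hlt : m < lst.length := hn
    rw [show ((m + 1 : Nat) : Int) = (m : Int) + 1 by push_cast; ring,
      PySem.List.pyRange_one_succ_right (by positivity), List.foldl_append,
      ih (Nat.le_of_succ_le hn)]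
    simp only [List.foldl_cons, List.foldl_nil,
      PySem.List.pyGetD_natCast, List.getD_eq_getElem _ _ hlt]
    rw [← List.take_concat_get' lst m hlt, List.sum_append]
    simp

-- ===== VERDICT (by name: the statement is the Claim_ definition above) =====
theorem solve_spec : Claim_equal_solve := by
  intro nums0 nums1 k _ hpre
  unfold Spec_solve solve solve_alt
  simp only [pairs_eq]
  set P := nums0.flatMap (fun i => nums1.map (fun j => i + j)) with hP
  have hlenP : P.length = nums0.length * nums1.length := by
    simp [hP, List.length_flatMap]
  by_cases hk : k ≤ 0
  · rw [if_pos hk, PySem.List.pyRange_one_eq_nil hk]; rfl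
  · rw [if_neg hk]
    have hk1 : 1 ≤ k.toNat := by omega
    rw [fold_pairs_eq, fold_stepTop k.toNat hk1 P]
    set asc := PySem.List.sorted P id false with hasc
    have hsa : sortA P = asc := by
      refine List.Perm.eq_of_pairwise (le := fun a b : Int => a ≤ b)
        (fun _ _ _ _ hab hba => le_antisymm hab hba)
        (sortA_sorted_perm P).1 (by simpa using PySem.List.sorted_pairwise P id)
        ((sortA_sorted_perm P).2.trans (PySem.List.sorted_perm P id false).symm)
    have hlen : asc.length = P.length := PySem.List.length_sorted P id false
    have hcast : ((nums0.length * nums1.length : Nat) : Int) = (nums0.length : Int) * (nums1.length : Int) := by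
      push_cast; ring
    have hpre' : k ≤ (P.length : Int) := by rw [hlenP, hcast]; exact hpre
    have hkle : k.toNat ≤ asc.length := by rw [hlen]; omega
    rw [sorted_rev_eq, show k = ((k.toNat : Nat) : Int) from (Int.toNat_of_nonneg (by omega)).symm,
      index_sum_nat _ k.toNat (by rw [List.length_reverse]; exact hkle),
      List.take_reverse, List.sum_reverse, hsa, hlen, Int.toNat_natCast]
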